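-- pv_equiv track=rewrite | github.com/louailou123/Streamlining-systematic-reviews-with-llms | agents/agent_4.py | _top_multivalue
-- ===== SOURCE A (Python) =====
-- from collections import Counter
-- from typing import Dict, Any, List, Tuple
--
-- def _pick_first_nonempty(row: dict, keys: List[str]) -> str:
--     for key in keys:
--         value = row.get(key, "")
--         if value is not None and str(value).strip() and str(value).strip() not in {"N/A", "None", "nan"}:
--             return str(value).strip()
--     return ""
--
-- def _normalize_text(value: str) -> str:
--     if not value:
--         return ""
--     return " ".join(str(value).replace("\r", " ").replace("\n", " ").split()).strip()
--
-- def _split_multi(value: str, split_commas: bool = False) -> List[str]: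
--     if not value:
--         return []
--
--     text = str(value).replace("|", ";")
--     if split_commas:
--         text = text.replace(",", ";")
--
--     items: List[str] = []
--     for part in text.split(";"):
--         clean = _normalize_text(part)
--         if clean and clean.lower() not in {"unknown", "n/a", "none"} and clean not in items:
--             items.append(clean)
--
--     return items
--
-- def _top_multivalue(
--     rows: List[dict],
--     keys: List[str],
--     top_n: int = 20,
--     split_commas: bool = False,
-- ) -> Dict[str, int]:
--     counter: Counter = Counter()
--     for row in rows:
--         raw = _pick_first_nonempty(row, keys)
--         for item in _split_multi(raw, split_commas=split_commas):
--             counter[item] += 1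
--     return dict(counter.most_common(top_n))
-- ===== SOURCE B (Python) =====
-- def _pick_first_nonempty(row, keys):
--     for key in keys:
--         value = row.get(key, "")
--         if value is not None and str(value).strip() and str(value).strip() not in {"N/A", "None", "nan"}:
--             return str(value).strip()
--     return ""
--
-- def _normalize_text(value):
--     if not value:
--         return ""
--     return " ".join(str(value).replace("\r", " ").replace("\n", " ").split()).strip()
--
-- def _split_multi(value, split_commas=False):
--     text = str(value).replace("|", ";")
--     if split_commas:
--         text = text.replace(",", ";")
--     cleaned = [_normalize_text(p) for p in text.split(";")]
--     vals = [c for c in cleaned if c and c.lower() not in {"unknown", "n/a", "none"}]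
--     return list(dict.fromkeys(vals))
--
-- def _top_multivalue(rows, keys, top_n=20, split_commas=False):
--     counts = {}
--     for row in rows:
--         for item in _split_multi(_pick_first_nonempty(row, keys), split_commas):
--             counts[item] = counts.get(item, 0) + 1
--     # pigeonhole (counting-sort) selection: bucket the distinct items by their
--     # count, then sweep the buckets from the highest count downwards; within a
--     # bucket items keep first-seen order, which is exactly most_common's order.
--     buckets = {}
--     for item, c in counts.items():
--         buckets[c] = buckets.get(c, []) + [item]
--     maxc = max(counts.values(), default=0)
--     ranked = []
--     for c in range(maxc, 0, -1):
--         ranked.extend((item, c) for item in buckets.get(c, []))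
--     return dict(ranked[: top_n if top_n > 0 else 0])
-- ===== Notes on version B (the rewrite author's own statement) =====
-- stated objective: alternative
-- what changed: B replaces most_common's comparison-based top-n selection with a pigeonhole counting sort: it buckets the distinct items by their count in a dict and sweeps the buckets from max(count) down to 1 (first-seen order within a bucket matching most_common's stable tie order), slicing to a clamped top_n; the split helper is also rewritten as map/filter comprehensions with a dict.fromkeys dedup instead of A's append-with-membership loop.
import Mathlib
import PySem

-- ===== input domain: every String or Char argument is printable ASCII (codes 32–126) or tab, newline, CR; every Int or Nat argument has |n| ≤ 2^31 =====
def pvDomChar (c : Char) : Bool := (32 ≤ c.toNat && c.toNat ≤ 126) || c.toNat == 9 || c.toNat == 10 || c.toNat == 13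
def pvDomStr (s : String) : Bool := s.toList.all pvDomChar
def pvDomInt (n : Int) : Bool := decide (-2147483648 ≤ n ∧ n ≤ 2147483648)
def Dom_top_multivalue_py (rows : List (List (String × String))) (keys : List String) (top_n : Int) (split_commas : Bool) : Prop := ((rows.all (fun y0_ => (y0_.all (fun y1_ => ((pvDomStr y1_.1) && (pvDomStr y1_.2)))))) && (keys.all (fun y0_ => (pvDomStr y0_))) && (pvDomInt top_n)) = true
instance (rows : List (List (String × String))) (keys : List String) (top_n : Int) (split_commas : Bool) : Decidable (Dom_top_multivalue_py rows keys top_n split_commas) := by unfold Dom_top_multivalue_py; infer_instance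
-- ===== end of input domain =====

-- B selects the top_n by a pigeonhole counting sort — bucket the distinct items by count,
-- sweep the buckets from max(count) down to 1, slice to a clamped top_n — instead of A's
-- Counter.most_common comparison-based selection; B's _split_multi is map/filter
-- comprehensions with a dict.fromkeys dedup instead of A's append-with-membership loop.

-- ===== PORT A =====
-- shared helpers, used verbatim by both Pythons: _pick_first_nonempty and _normalize_text
def pvPickFirst (row : List (String × String)) (keys : List String) : String :=
  match keys with
  | [] => ""
  | k :: ks =>
    let value := PySem.Dict.getD (PySem.Dict.mk row) k ""
    -- value is a str, never None; truthiness of value.strip() = strip ≠ ""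
    if PySem.Str.strip value ≠ "" ∧ PySem.Str.strip value ∉ (["N/A", "None", "nan"] : List String)
    then PySem.Str.strip value
    else pvPickFirst row ks

def pvNormalize (value : String) : String :=
  if value = "" then ""
  else PySem.Str.strip (PySem.Str.join " "
    (PySem.Str.split₀ (PySem.Str.replace (PySem.Str.replace value "\r" " ") "\n" " ")))

def pvBad : List String := ["unknown", "n/a", "none"]

-- A's _split_multi: replace-then-split, then an append loop guarded by membership in the output
def pvSplitMultiA (value : String) (split_commas : Bool) : List String :=
  if value = "" then []
  else
    let text := PySem.Str.replace value "|" ";"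
    let text := if split_commas then PySem.Str.replace text "," ";" else text
    -- text.split(";"): sep ";" ≠ "", so split? is always some
    ((PySem.Str.split? text ";").getD []).foldl (fun items part =>
      let clean := pvNormalize part
      if clean ≠ "" ∧ PySem.Str.lower clean ∉ pvBad ∧ clean ∉ items
      then items ++ [clean] else items) []

def top_multivalue_py (rows : List (List (String × String))) (keys : List String) (top_n : Int) (split_commas : Bool) : List (String × Int) :=
  let counter := rows.foldl (fun d row =>
      (pvSplitMultiA (pvPickFirst row keys) split_commas).foldl
        (fun d item => d.modify item 0 (· + 1)) d)
    PySem.Dict.empty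
  -- counter.most_common(top_n) = sorted(items, key=count, reverse=True)[:n], [] for n ≤ 0
  (PySem.List.sorted counter.items (fun kv => kv.2) true).take top_n.toNat

-- ===== PORT B =====
-- B's _split_multi: comprehension pipeline, dedup last via dict.fromkeys
def pvSplitMultiB (value : String) (split_commas : Bool) : List String :=
  let text := PySem.Str.replace value "|" ";"
  let text := if split_commas then PySem.Str.replace text "," ";" else text
  let cleaned := ((PySem.Str.split? text ";").getD []).map pvNormalize
  let vals := cleaned.filter (fun c => c ≠ "" && !(pvBad.contains (PySem.Str.lower c)))
  PySem.List.dedup vals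

def top_multivalue_py_alt (rows : List (List (String × String))) (keys : List String) (top_n : Int) (split_commas : Bool) : List (String × Int) :=
  let counts := rows.foldl (fun d row =>
      (pvSplitMultiB (pvPickFirst row keys) split_commas).foldl
        (fun d item => d.insert item (d.getD item 0 + 1)) d)
    PySem.Dict.empty
  -- buckets[c] = buckets.get(c, []) + [item]
  let buckets : PySem.Dict Int (List String) := counts.items.foldl
      (fun b p => b.insert p.2 (b.getD p.2 [] ++ [p.1])) PySem.Dict.empty
  -- maxc = max(counts.values(), default=0)
  let maxc := PySem.List.maxD counts.values (fun v => v) 0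
  -- for c in range(maxc, 0, -1): ranked.extend((item, c) for item in buckets.get(c, []))
  let ranked := (PySem.List.pyRange maxc 0 (-1)).foldl
      (fun acc c => acc ++ (buckets.getD c []).map (fun item => (item, c))) []
  ranked.take (if top_n > 0 then top_n else 0).toNat

-- ===== PRECONDITION & SPEC =====
def Spec_top_multivalue_py (rows : List (List (String × String))) (keys : List String) (top_n : Int) (split_commas : Bool) (out : List (String × Int)) : Prop := out = top_multivalue_py_alt rows keys top_n split_commas
instance (rows : List (List (String × String))) (keys : List String) (top_n : Int) (split_commas : Bool) (out : List (String × Int)) : Decidable (Spec_top_multivalue_py rows keys top_n split_commas out) := by unfold Spec_top_multivalue_py; infer_instance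

-- ===== CLAIM (what is proved, stated in full; the proofs are below) =====
def Claim_equal_top_multivalue_py : Prop := ∀ (rows : List (List (String × String))) (keys : List String) (top_n : Int) (split_commas : Bool), Dom_top_multivalue_py rows keys top_n split_commas → Spec_top_multivalue_py rows keys top_n split_commas (top_multivalue_py rows keys top_n split_commas)

-- ===== LEMMAS AND PROOFS =====

-- the elementwise keep-condition of A's split loop
def pvKeep (c : String) : Bool := c ≠ "" && !(pvBad.contains (PySem.Str.lower c))

lemma pvSplit_step (items : List String) (c : String) :
    (if c ≠ "" ∧ PySem.Str.lower c ∉ pvBad ∧ c ∉ items then items ++ [c] else items)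
      = if pvKeep c then PySem.Set.add items c else items := by
  by_cases h1 : c = "" <;> by_cases h2 : PySem.Str.lower c ∈ pvBad <;>
    by_cases h3 : c ∈ items <;>
    simp [pvKeep, PySem.Set.add, PySem.Set.contains, h1, h2, h3]

lemma pvSplitAB (value : String) (sc : Bool) :
    pvSplitMultiA value sc = pvSplitMultiB value sc := by
  by_cases hv : value = ""
  · subst hv; cases sc <;> decide
  · unfold pvSplitMultiA pvSplitMultiB
    simp only [if_neg hv]
    rw [PySem.List.dedup_eq_ofList, PySem.Set.ofList_eq_foldl, List.foldl_filter,
      List.foldl_map]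
    simp only [pvSplit_step, pvKeep]
    rfl

-- A's Counter loop, flattened: the counter of the flat item list
lemma pvCounterEqA (rows : List (List (String × String))) (keys : List String) (sc : Bool) :
    rows.foldl (fun d row =>
        (pvSplitMultiA (pvPickFirst row keys) sc).foldl
          (fun d item => d.modify item 0 (· + 1)) d)
      PySem.Dict.empty
      = PySem.Dict.counter
          (rows.flatMap (fun row => pvSplitMultiB (pvPickFirst row keys) sc)) := by
  rw [PySem.Dict.counter_eq_foldl, List.foldl_flatMap]
  simp only [pvSplitAB]

-- B's get-and-assign loop, flattened: the same counter
lemma pvCounterEqB (rows : List (List (String × String))) (keys : List String) (sc : Bool) :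
    rows.foldl (fun d row =>
        (pvSplitMultiB (pvPickFirst row keys) sc).foldl
          (fun d item => d.insert item (d.getD item 0 + 1)) d)
      PySem.Dict.empty
      = PySem.Dict.counter
          (rows.flatMap (fun row => pvSplitMultiB (pvPickFirst row keys) sc)) := by
  rw [← PySem.Dict.foldl_insert_getD_add_one_eq_counter, List.foldl_flatMap]

-- insertBy walks past a prefix it does not insert into
lemma pvInsertBy_append (before : (String × Int) → (String × Int) → Bool)
    (x : String × Int) (A B : List (String × Int))
    (h : ∀ y ∈ A, before x y = false) :
    PySem.List.insertBy before x (A ++ B) = A ++ PySem.List.insertBy before x B := by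
  induction A with
  | nil => simp
  | cons a as ih =>
    have ha := h a (by simp)
    simp [PySem.List.insertBy, ha, ih (fun y hy => h y (by simp [hy]))]

-- inserting one pair into the bucketed form of L gives the bucketed form of L ++ [x]
lemma pvInsertBucket (cs : List Int) (hp : cs.Pairwise (· > ·))
    (x : String × Int) (hx : x.2 ∈ cs) (L : List (String × Int)) :
    PySem.List.insertBy (fun a b => decide (b.2 < a.2)) x
        (cs.flatMap (fun c => L.filter (fun p => p.2 == c)))
      = cs.flatMap (fun c => (L ++ [x]).filter (fun p => p.2 == c)) := by
  induction cs with
  | nil => simp at hx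
  | cons c rest ih =>
    have hcr : ∀ c' ∈ rest, c' < c := fun c' h' => (List.pairwise_cons.1 hp).1 c' h'
    have hrest : rest.Pairwise (· > ·) := (List.pairwise_cons.1 hp).2
    by_cases hxc : x.2 = c
    · -- x lands at the end of the head bucket, before everything in the tail buckets
      have hfilt : (L ++ [x]).filter (fun p => p.2 == c)
          = L.filter (fun p => p.2 == c) ++ [x] := by
        simp [List.filter_append, hxc]
      have hxrest : ∀ c' ∈ rest, ((L ++ [x]).filter (fun p => p.2 == c'))
          = L.filter (fun p => p.2 == c') := by
        intro c' h'
        have : x.2 ≠ c' := by have := hcr c' h'; omega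
        simp [List.filter_append, this]
      simp only [List.flatMap_cons]
      rw [pvInsertBy_append _ x _ _ (by
        intro y hy
        have : y.2 = c := by
          have := List.of_mem_filter hy; simpa using this
        simp [this, hxc])]
      rw [hfilt]
      have htail : PySem.List.insertBy (fun a b => decide (b.2 < a.2)) x
          (rest.flatMap (fun c' => L.filter (fun p => p.2 == c')))
          = x :: rest.flatMap (fun c' => L.filter (fun p => p.2 == c')) := by
        cases hfl : rest.flatMap (fun c' => L.filter (fun p => p.2 == c')) with
        | nil => simp [PySem.List.insertBy]
        | cons y ys =>
          have hy : y ∈ rest.flatMap (fun c' => L.filter (fun p => p.2 == c')) := by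
            simp [hfl]
          obtain ⟨c', hc', hyf⟩ := List.mem_flatMap.1 hy
          have hy2 : y.2 = c' := by have := List.of_mem_filter hyf; simpa using this
          have : y.2 < x.2 := by have := hcr c' hc'; omega
          simp [PySem.List.insertBy, this]
      rw [htail]
      have : rest.flatMap (fun c' => (L ++ [x]).filter (fun p => p.2 == c'))
          = rest.flatMap (fun c' => L.filter (fun p => p.2 == c')) :=
        List.flatMap_congr (by intro c' h'; rw [hxrest c' h'])
      rw [this]
      simp
    · -- x belongs to a later bucket: skip the head bucket and recurse
      have hxr : x.2 ∈ rest := by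
        cases List.mem_cons.1 hx with
        | inl h => exact absurd h hxc
        | inr h => exact h
      have hxlt : x.2 < c := hcr _ hxr
      have hhead : (L ++ [x]).filter (fun p => p.2 == c) = L.filter (fun p => p.2 == c) := by
        simp [List.filter_append, hxc]
      simp only [List.flatMap_cons]
      rw [pvInsertBy_append _ x _ _ (by
        intro y hy
        have : y.2 = c := by have := List.of_mem_filter hy; simpa using this
        simp [this]; omega)]
      rw [ih hrest hxr, hhead]

lemma pvFlatMapCongr (cs : List Int) (f g : Int → List (String × Int))
    (h : ∀ c ∈ cs, f c = g c) : cs.flatMap f = cs.flatMap g :=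
  List.flatMap_congr h

-- the stable reverse sort by count IS the bucket sweep
lemma pvSortedEqSweep (items : List (String × Int)) (cs : List Int)
    (hp : cs.Pairwise (· > ·)) (hmem : ∀ p ∈ items, p.2 ∈ cs) :
    PySem.List.sorted items (fun kv => kv.2) true
      = cs.flatMap (fun c => items.filter (fun p => p.2 == c)) := by
  rw [PySem.List.sorted_rev_eq_foldl_insertBy]
  suffices h : ∀ (l : List (String × Int)) (L : List (String × Int)),
      (∀ p ∈ l, p.2 ∈ cs) →
      l.foldl (fun acc x => PySem.List.insertBy (fun a b => decide ((fun kv : String × Int => kv.2) b < (fun kv : String × Int => kv.2) a)) x acc)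
          (cs.flatMap (fun c => L.filter (fun p => p.2 == c)))
        = cs.flatMap (fun c => (L ++ l).filter (fun p => p.2 == c)) by
    have h0 : cs.flatMap (fun c => ([] : List (String × Int)).filter (fun p => p.2 == c)) = [] := by
      simp [List.flatMap_eq_nil_iff]
    have := h items [] hmem
    rw [h0] at this
    simpa using this
  intro l
  induction l with
  | nil => intro L _; simp
  | cons x xs ih =>
    intro L hl
    simp only [List.foldl_cons]
    rw [pvInsertBucket cs hp x (hl x (by simp)) L]
    rw [ih (L ++ [x]) (fun p hp' => hl p (by simp [hp']))]
    simp

-- re-attaching the count to a bucket's items restores the original pairs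
lemma pvMapBack (l : List (String × Int)) (c : Int) :
    ((l.filter (fun p => p.2 == c)).map (fun p => p.1)).map (fun item => (item, c))
      = l.filter (fun p => p.2 == c) := by
  rw [List.map_map]
  have hc : ∀ p ∈ l.filter (fun p => p.2 == c),
      ((fun item => (item, c)) ∘ fun p : String × Int => p.1) p = id p := by
    intro p hp
    have h2 : p.2 = c := by have := List.of_mem_filter hp; simpa using this
    simp [Function.comp, ← h2]
  rw [List.map_congr_left hc, List.map_id]

lemma pvTakeEq (top_n : Int) : top_n.toNat = (if top_n > 0 then top_n else 0).toNat := by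
  split <;> omega

-- ===== VERDICT (by name: the statement is the Claim_ definition above) =====
theorem top_multivalue_py_spec : Claim_equal_top_multivalue_py := by
  intro rows keys top_n sc _
  unfold Spec_top_multivalue_py top_multivalue_py top_multivalue_py_alt
  dsimp only
  rw [pvCounterEqA, pvCounterEqB]
  set allItems := rows.flatMap (fun row => pvSplitMultiB (pvPickFirst row keys) sc) with hAll
  set ctr := PySem.Dict.counter allItems with hctr
  set maxc := PySem.List.maxD ctr.values (fun v => v) 0 with hmax
  set cs := PySem.List.pyRange maxc 0 (-1) with hcs
  -- the countdown range is strictly decreasing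
  have hp : cs.Pairwise (· > ·) := by
    rw [hcs, PySem.List.pyRange_neg_one]
    rw [List.pairwise_map]
    exact (List.pairwise_lt_range).imp (by intro a b h; omega)
  -- every counted pair's count lies in the range
  have hmem : ∀ p ∈ ctr.items, p.2 ∈ cs := by
    intro p hpmem
    have hle : p.2 ≤ maxc := by
      apply PySem.List.le_maxD_id ctr.values 0
      have : p.2 ∈ ctr.items.map (fun q => q.2) := List.mem_map_of_mem hpmem
      simpa [PySem.Dict.values] using this
    have hge : 1 ≤ p.2 := by
      rw [hctr, PySem.Dict.items_counter] at hpmem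
      obtain ⟨k, hk, hkp⟩ := List.mem_map.1 hpmem
      have hkin : k ∈ allItems := (PySem.Set.mem_ofList _ _).1 hk
      have : 0 < allItems.count k := List.count_pos_iff.2 hkin
      rw [← hkp]; simp; omega
    rw [hcs, PySem.List.pyRange_neg_one]
    refine List.mem_map.2 ⟨(maxc - p.2).toNat, List.mem_range.2 (by omega), by omega⟩
  -- sorted = sweep of buckets
  rw [pvSortedEqSweep ctr.items cs hp hmem]
  -- B's ranked list: unfold the two loops and the bucket dict
  have hbuckets : ∀ c : Int,
      (ctr.items.foldl (fun b p => b.insert p.2 (b.getD p.2 [] ++ [p.1]))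
        (PySem.Dict.empty : PySem.Dict Int (List String))).getD c []
      = (ctr.items.filter (fun p => p.2 == c)).map (fun p => p.1) := by
    intro c
    have hswap : ctr.items.foldl (fun b p => b.insert p.2 (b.getD p.2 [] ++ [p.1]))
        (PySem.Dict.empty : PySem.Dict Int (List String))
        = (ctr.items.map (fun p => (p.2, p.1))).foldl
            (fun b q => b.modify q.1 [] (· ++ [q.2])) PySem.Dict.empty := by
      rw [List.foldl_map]; rfl
    rw [hswap, PySem.Dict.getD_foldl_modify_append]
    rw [List.filter_map]
    simp [PySem.Dict.getD_empty, List.map_map, Function.comp_def]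
  have hranked : cs.foldl (fun acc c => acc ++
        ((ctr.items.foldl (fun b p => b.insert p.2 (b.getD p.2 [] ++ [p.1]))
          (PySem.Dict.empty : PySem.Dict Int (List String))).getD c []).map
          (fun item => (item, c))) []
      = cs.flatMap (fun c => ctr.items.filter (fun p => p.2 == c)) := by
    rw [PySem.List.foldl_append_eq_flatMap]
    simp only [List.nil_append]
    apply pvFlatMapCongr
    intro c _
    rw [hbuckets c, pvMapBack]
  rw [hranked, ← pvTakeEq]
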